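-- pv_equiv track=rewrite | github.com/pypi-data/pypi-mirror-137 | packages/zks-pylib/zks_pylib-1.0.2-py2.py3-none-any.whl/libsnmp/snmp_get_interface.py | __DoBulkName
-- ===== SOURCE A (Python) =====
-- def __DoBulkName(name, snmpResult, dictLog):
--
--     lstPoStatus = list()
--     strResult = ""
--     if snmpResult != None:
--
--         for index in range(len(snmpResult)):
--             if index == 0:
--                 #lstPoStatus[0] = snmpResult[0] # 수집 결과 0번 값이 결과값 0번  port
--                 lstPoStatus.insert(index, snmpResult[index])
--             elif index == 1:
--                 #lstPoStatus[2] = snmpResult[1] # 수집 결과 1번 값이 결과값 2번  port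
--                 lstPoStatus.insert(index+1, snmpResult[index])
--             elif index == 2:
--                 #lstPoStatus[1] = snmpResult[2] # 수집 결과 2번 값이 결과값 1번  port
--                 lstPoStatus.insert(index-1, snmpResult[index])
--             elif index == 3:
--                 #lstPoStatus[3] = snmpResult[3] # 수집 결과 3번 값이 결과값 3번  port
--                 lstPoStatus.insert(index, snmpResult[index])
--
--         strResult = ','.join(lstPoStatus) # PO 알람일 경우 , 로 묶어 준다. (향후 다른 타입이 들어올수 있으므로 별도 함수 호출 구분 필요)
--         dictLog[name] = strResult
--
--     return strResult
-- ===== SOURCE B (Python) =====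
-- def __DoBulkName(name, snmpResult, dictLog):
--     if snmpResult is None:
--         return ""
--     res = list(snmpResult[:4])
--     if len(res) >= 3:
--         res[1], res[2] = res[2], res[1]
--     strResult = ",".join(res)
--     dictLog[name] = strResult
--     return strResult
-- ===== Notes on version B (the rewrite author's own statement) =====
-- stated objective: simpler
-- what changed: Replaces the per-index loop with four insert-position branches by a direct slice of the first four elements plus one conditional swap of positions 1 and 2, and adds an early return for None.
import Mathlib
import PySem

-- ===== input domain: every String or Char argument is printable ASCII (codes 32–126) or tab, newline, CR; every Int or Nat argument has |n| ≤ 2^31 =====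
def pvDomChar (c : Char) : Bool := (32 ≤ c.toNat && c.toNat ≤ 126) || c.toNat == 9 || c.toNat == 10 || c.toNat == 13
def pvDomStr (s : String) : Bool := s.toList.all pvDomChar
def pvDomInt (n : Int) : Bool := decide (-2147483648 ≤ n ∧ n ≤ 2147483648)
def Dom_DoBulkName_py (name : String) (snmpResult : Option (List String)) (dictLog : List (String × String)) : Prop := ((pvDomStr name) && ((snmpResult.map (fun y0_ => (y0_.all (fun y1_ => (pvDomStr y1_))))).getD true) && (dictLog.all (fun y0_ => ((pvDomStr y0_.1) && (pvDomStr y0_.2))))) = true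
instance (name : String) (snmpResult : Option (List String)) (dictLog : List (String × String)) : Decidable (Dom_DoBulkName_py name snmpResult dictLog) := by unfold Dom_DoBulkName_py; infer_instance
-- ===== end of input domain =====

-- B replaces A's per-index loop of position-juggling inserts by a slice of the first
-- four elements and one conditional swap (objective: simpler). Both Pythons also
-- write dictLog[name] identically when snmpResult is not None; the equivalence
-- proved here is about the RETURN value only.

-- ===== PORT A =====
-- A's loop body: the four index branches, each inserting at the branch's position.
def pvStepA (xs : List String) (acc : List String) (index : Int) : List String :=
  if index = 0 then PySem.List.insert acc index (PySem.List.pyGetD xs index "")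
  else if index = 1 then PySem.List.insert acc (index + 1) (PySem.List.pyGetD xs index "")
  else if index = 2 then PySem.List.insert acc (index - 1) (PySem.List.pyGetD xs index "")
  else if index = 3 then PySem.List.insert acc index (PySem.List.pyGetD xs index "")
  else acc

def DoBulkName_py (name : String) (snmpResult : Option (List String)) (dictLog : List (String × String)) : String :=
  match snmpResult with
  | none => ""
  | some xs =>
    let lstPoStatus := (PySem.List.pyRange 0 (PySem.List.len xs) 1).foldl (pvStepA xs) []
    PySem.Str.join "," lstPoStatus

-- ===== PORT B =====
def DoBulkName_py_alt (name : String) (snmpResult : Option (List String)) (dictLog : List (String × String)) : String :=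
  match snmpResult with
  | none => ""
  | some xs =>
    let res := PySem.List.slice xs none (some 4)
    let res :=
      if 3 ≤ res.length then
        match res with
        | a :: b :: c :: rest => a :: c :: b :: rest
        | r => r
      else res
    PySem.Str.join "," res

-- ===== PRECONDITION & SPEC =====
def Spec_DoBulkName_py (name : String) (snmpResult : Option (List String)) (dictLog : List (String × String)) (out : String) : Prop := out = DoBulkName_py_alt name snmpResult dictLog
instance (name : String) (snmpResult : Option (List String)) (dictLog : List (String × String)) (out : String) : Decidable (Spec_DoBulkName_py name snmpResult dictLog out) := by unfold Spec_DoBulkName_py; infer_instance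

-- ===== CLAIM (what is proved, stated in full; the proofs are below) =====
def Claim_equal_DoBulkName_py : Prop := ∀ (name : String) (snmpResult : Option (List String)) (dictLog : List (String × String)), Dom_DoBulkName_py name snmpResult dictLog → Spec_DoBulkName_py name snmpResult dictLog (DoBulkName_py name snmpResult dictLog)

-- ===== LEMMAS AND PROOFS =====

-- Indices ≥ 4 fall through every branch of A's loop body.
theorem pvStepA_skip (xs : List String) (l : List Int) (acc : List String)
    (h : ∀ i ∈ l, (4 : Int) ≤ i) : l.foldl (pvStepA xs) acc = acc := by
  induction l generalizing acc with
  | nil => rfl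
  | cons i t ih =>
    have hi : (4 : Int) ≤ i := h i (List.mem_cons_self)
    have hstep : pvStepA xs acc i = acc := by
      unfold pvStepA
      rw [if_neg (by omega), if_neg (by omega), if_neg (by omega), if_neg (by omega)]
    rw [List.foldl_cons, hstep]
    exact ih _ (fun j hj => h j (List.mem_cons_of_mem _ hj))

-- A's loop over a list of length ≥ 4 produces [a, c, b, d].
theorem pvA_long (a b c d : String) (t : List String) :
    (PySem.List.pyRange 0 (PySem.List.len (a :: b :: c :: d :: t)) 1).foldl
      (pvStepA (a :: b :: c :: d :: t)) [] = [a, c, b, d] := by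
  have hlen : PySem.List.len (a :: b :: c :: d :: t) = 4 + (t.length : Int) := by
    simp [PySem.List.len]; ring
  rw [hlen, PySem.List.pyRange_one_append 0 4 (4 + (t.length : Int)) (by omega) (by omega),
      List.foldl_append]
  have h4 : PySem.List.pyRange 0 4 1 = [0, 1, 2, 3] := by decide
  rw [h4]
  have hpre : ([0, 1, 2, 3] : List Int).foldl (pvStepA (a :: b :: c :: d :: t)) [] = [a, c, b, d] := by
    simp only [List.foldl_cons, List.foldl_nil, pvStepA]
    norm_num [PySem.List.pyGetD_ofNat']
    rfl
  rw [hpre]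
  exact pvStepA_skip _ _ _ (fun i hi => ((PySem.List.mem_pyRange_one).1 hi).1)

-- ===== VERDICT (by name: the statement is the Claim_ definition above) =====
theorem DoBulkName_py_spec : Claim_equal_DoBulkName_py := by
  intro name snmpResult dictLog _
  show DoBulkName_py name snmpResult dictLog = DoBulkName_py_alt name snmpResult dictLog
  match snmpResult with
  | none => rfl
  | some xs =>
    match xs with
    | [] => rfl
    | [a] =>
      simp only [DoBulkName_py, DoBulkName_py_alt]
      have hr : PySem.List.pyRange 0 (PySem.List.len [a]) 1 = [0] := by
        norm_num [PySem.List.len, PySem.List.pyRange_one]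
      rw [hr, PySem.List.slice_to _ (by omega)]
      simp only [List.foldl_cons, List.foldl_nil, pvStepA]
      norm_num [PySem.List.pyGetD_ofNat']
      rfl
    | [a, b] =>
      simp only [DoBulkName_py, DoBulkName_py_alt]
      have hr : PySem.List.pyRange 0 (PySem.List.len [a, b]) 1 = [0, 1] := by
        norm_num [PySem.List.len, PySem.List.pyRange_one]
        decide
      rw [hr, PySem.List.slice_to _ (by omega)]
      simp only [List.foldl_cons, List.foldl_nil, pvStepA]
      norm_num [PySem.List.pyGetD_ofNat']
      rfl
    | [a, b, c] =>
      simp only [DoBulkName_py, DoBulkName_py_alt]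
      have hr : PySem.List.pyRange 0 (PySem.List.len [a, b, c]) 1 = [0, 1, 2] := by
        norm_num [PySem.List.len, PySem.List.pyRange_one]
        decide
      rw [hr, PySem.List.slice_to _ (by omega)]
      simp only [List.foldl_cons, List.foldl_nil, pvStepA]
      norm_num [PySem.List.pyGetD_ofNat']
      rfl
    | a :: b :: c :: d :: t =>
      have hA := pvA_long a b c d t
      have hB : PySem.List.slice (a :: b :: c :: d :: t) none (some 4) = [a, b, c, d] := by
        rw [PySem.List.slice_to _ (by omega)]
        rfl
      simp only [DoBulkName_py, DoBulkName_py_alt]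
      rw [hA, hB]
      norm_num
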